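-- pv_equiv track=rewrite | github.com/NouNelson/RSA_chiffrage | Noutadie_Nelson.py | home_int_to_string
-- ===== SOURCE A (Python) =====
-- def home_int_to_string(x): # pour transformer un int en string
--     txt=''
--     res1=x
--     while res1>0:
--         res=res1%(pow(2,8))
--         res1=(res1-res)//(pow(2,8))
--         txt=txt+chr(res)
--     return txt
-- ===== SOURCE B (Python) =====
-- def home_int_to_string(x): # pour transformer un int en string
--     if x <= 0:
--         return ''
--     n = (x.bit_length() + 7) // 8
--     return ''.join(map(chr, x.to_bytes(n, 'little')))
-- ===== Notes on version B (the rewrite author's own statement) =====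
-- stated objective: idiomatic
-- what changed: Replaces the incremental divide-by-256 while loop with a closed-form byte count from bit_length plus a single to_bytes('little') extraction joined with chr.
import Mathlib
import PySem

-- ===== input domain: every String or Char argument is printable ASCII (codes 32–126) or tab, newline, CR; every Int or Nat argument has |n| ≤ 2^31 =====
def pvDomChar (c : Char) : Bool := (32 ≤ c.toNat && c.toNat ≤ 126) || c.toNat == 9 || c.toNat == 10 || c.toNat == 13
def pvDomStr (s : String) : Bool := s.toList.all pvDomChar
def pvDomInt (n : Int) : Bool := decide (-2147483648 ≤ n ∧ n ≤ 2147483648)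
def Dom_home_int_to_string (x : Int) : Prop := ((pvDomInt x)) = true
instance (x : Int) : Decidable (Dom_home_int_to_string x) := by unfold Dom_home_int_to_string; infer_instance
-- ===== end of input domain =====

-- B replaces A's incremental divide-by-256 loop with a closed-form byte count (bit_length)
-- and a direct little-endian byte extraction (idiomatic; same cost).

-- ===== PORT A =====
-- the while loop of A: res1 > 0 → append chr(res1 % 256), continue with (res1 - res) // 256
def home_int_to_string_go (res1 : Int) (txt : List Char) : List Char :=
  if _h : res1 > 0 then
    let res := PySem.Int.mod res1 256
    home_int_to_string_go (PySem.Int.floordiv (res1 - res) 256)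
      (txt ++ [Char.ofNat res.toNat])
  else txt
termination_by res1.toNat
decreasing_by
  rw [PySem.Int.floordiv_eq_ediv_of_pos (show (0:Int) < 256 by omega),
      PySem.Int.mod_eq_emod_of_pos (show (0:Int) < 256 by omega)]
  omega

def home_int_to_string (x : Int) : String :=
  String.ofList (home_int_to_string_go x [])

-- ===== PORT B =====
def home_int_to_string_alt (x : Int) : String :=
  if x ≤ 0 then "" else
    let n := (PySem.Int.bitLength x + 7) / 8
    String.ofList ((List.range n).map (fun i => Char.ofNat ((x.toNat >>> (8 * i)) % 256)))

-- ===== PRECONDITION & SPEC =====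
def Spec_home_int_to_string (x : Int) (out : String) : Prop := out = home_int_to_string_alt x
instance (x : Int) (out : String) : Decidable (Spec_home_int_to_string x out) := by unfold Spec_home_int_to_string; infer_instance

-- ===== CLAIM (what is proved, stated in full; the proofs are below) =====
def Claim_equal_home_int_to_string : Prop := ∀ (x : Int), Dom_home_int_to_string x → Spec_home_int_to_string x (home_int_to_string x)

-- ===== LEMMAS AND PROOFS =====

-- little-endian base-256 digits of a natural number, as A produces them
def pvDigits (m : Nat) : List Char :=
  if m = 0 then [] else Char.ofNat (m % 256) :: pvDigits (m / 256)
decreasing_by exact Nat.div_lt_self (by omega) (by omega)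

theorem go_eq_digits (m : Nat) : ∀ txt, home_int_to_string_go (m : Int) txt = txt ++ pvDigits m := by
  induction m using Nat.strong_induction_on with
  | _ m ih =>
    intro txt
    by_cases hm : m = 0
    · subst hm
      rw [home_int_to_string_go, pvDigits]
      simp
    · have hpos : (0:Int) < (m:Int) := by exact_mod_cast Nat.pos_of_ne_zero hm
      rw [home_int_to_string_go, pvDigits]
      simp only [hpos, dif_pos, if_neg hm]
      have hmod : PySem.Int.mod (m:Int) 256 = ((m % 256 : Nat) : Int) := by
        exact_mod_cast PySem.Int.mod_natCast m 256
      have hsub : ((m:Int) - ((m % 256 : Nat) : Int)) = ((m - m % 256 : Nat) : Int) := by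
        have : m % 256 ≤ m := Nat.mod_le m 256
        omega
      have hfd : PySem.Int.floordiv ((m:Int) - PySem.Int.mod (m:Int) 256) 256
          = ((m / 256 : Nat) : Int) := by
        rw [hmod, hsub]
        rw [show ((256:Int)) = ((256:Nat):Int) from rfl, PySem.Int.floordiv_natCast]
        congr 1
        have : m - m % 256 = 256 * (m / 256) := by
          have := Nat.mod_add_div m 256; omega
        rw [this, Nat.mul_div_cancel_left _ (by omega)]
      have hchr : (PySem.Int.mod ((m:Nat):Int) 256).toNat = m % 256 := by
        rw [hmod]; omega
      rw [hfd, hchr, ih (m / 256) (Nat.div_lt_self (Nat.pos_of_ne_zero hm) (by omega))]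
      simp

theorem bitLength_le_of_lt (m k : Nat) (h : m < 2 ^ k) : PySem.Int.bitLength (m:Int) ≤ k := by
  by_contra hc
  have h2 : 2 ^ (PySem.Int.bitLength (m:Int) - 1) ≤ ((m:Int)).natAbs := by
    apply PySem.Int.two_pow_bitLength_le
    intro h0
    have : m = 0 := by exact_mod_cast h0
    subst this
    simp [PySem.Int.bitLength_zero] at hc
  have h3 : 2 ^ k ≤ 2 ^ (PySem.Int.bitLength (m:Int) - 1) :=
    Nat.pow_le_pow_right (by omega) (by omega)
  simp at h2
  omega

theorem bitLength_pos_of_pos (m : Nat) (h : 0 < m) : 1 ≤ PySem.Int.bitLength (m:Int) := by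
  have := PySem.Int.lt_two_pow_bitLength (m:Int)
  simp at this
  by_contra hc
  have hz : PySem.Int.bitLength (m:Int) = 0 := by omega
  rw [hz] at this
  omega

theorem bitLength_div256 (m : Nat) (h : 256 ≤ m) :
    PySem.Int.bitLength (m:Int) = PySem.Int.bitLength ((m / 256 : Nat) : Int) + 8 := by
  have step : ∀ n : Nat, 2 ≤ n → PySem.Int.bitLength (n:Int) = PySem.Int.bitLength ((n / 2 : Nat) : Int) + 1 := by
    intro n hn
    exact PySem.Int.bitLength_natCast (by omega)
  have e1 := step m (by omega)
  have e2 := step (m / 2) (by omega)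
  have e3 := step (m / 2 / 2) (by omega)
  have e4 := step (m / 2 / 2 / 2) (by omega)
  have e5 := step (m / 2 / 2 / 2 / 2) (by omega)
  have e6 := step (m / 2 / 2 / 2 / 2 / 2) (by omega)
  have e7 := step (m / 2 / 2 / 2 / 2 / 2 / 2) (by omega)
  have e8 := step (m / 2 / 2 / 2 / 2 / 2 / 2 / 2) (by omega)
  have hdd : m / 2 / 2 / 2 / 2 / 2 / 2 / 2 / 2 = m / 256 := by
    omega
  rw [e1, e2, e3, e4, e5, e6, e7, e8, hdd]

theorem digits_eq_bytes (m : Nat) (hm : 0 < m) :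
    pvDigits m = (List.range ((PySem.Int.bitLength (m:Int) + 7) / 8)).map
      (fun i => Char.ofNat ((m >>> (8 * i)) % 256)) := by
  induction m using Nat.strong_induction_on with
  | _ m ih =>
    by_cases hbig : 256 ≤ m
    · have hqpos : 0 < m / 256 := Nat.div_pos hbig (by omega)
      have hb := bitLength_div256 m hbig
      have hn : (PySem.Int.bitLength (m:Int) + 7) / 8
          = (PySem.Int.bitLength ((m / 256 : Nat) : Int) + 7) / 8 + 1 := by omega
      rw [pvDigits, if_neg (by omega), hn, List.range_succ_eq_map]
      rw [ih (m / 256) (Nat.div_lt_self hm (by omega)) hqpos]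
      have hfun : ((fun i => Char.ofNat (m >>> (8 * i) % 256)) ∘ Nat.succ)
          = (fun i => Char.ofNat ((m / 256) >>> (8 * i) % 256)) := by
        funext i
        simp only [Function.comp_apply, Nat.succ_eq_add_one]
        have hsh : m >>> (8 * (i + 1)) = (m / 256) >>> (8 * i) := by
          rw [show 8 * (i + 1) = 8 + 8 * i by ring, Nat.shiftRight_add,
              Nat.shiftRight_eq_div_pow m 8]
        rw [hsh]
      rw [List.map_cons, List.map_map, hfun]
      simp
    · have h1 : PySem.Int.bitLength (m:Int) ≤ 8 := bitLength_le_of_lt m 8 (by omega)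
      have h2 : 1 ≤ PySem.Int.bitLength (m:Int) := bitLength_pos_of_pos m hm
      have hn : (PySem.Int.bitLength (m:Int) + 7) / 8 = 1 := by omega
      rw [pvDigits, if_neg (by omega), pvDigits, if_pos (by omega), hn]
      simp

-- ===== VERDICT (by name: the statement is the Claim_ definition above) =====
theorem home_int_to_string_spec : Claim_equal_home_int_to_string := by
  intro x _
  unfold Spec_home_int_to_string home_int_to_string home_int_to_string_alt
  by_cases hx : x ≤ 0
  · rw [home_int_to_string_go]
    simp [hx, show ¬ x > 0 by omega]
  · rw [if_neg hx]
    rw [show x = ((x.toNat : Nat) : Int) by omega, go_eq_digits x.toNat [],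
        digits_eq_bytes x.toNat (by omega)]
    have hmax : (max x 0).toNat = x.toNat := by omega
    simp [hmax]
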